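-- pv_equiv track=rewrite | github.com/KoMinjae/codingtest | 1860. 진기의 최고급 붕어빵.py | solution
-- ===== SOURCE A (Python) =====
-- def solution(cus,M,K):
--     count=0
--     time = 0
--     while cus:
--         if time != 0:
--             if time % M == 0:
--                 count+=K
--         if cus[0] <=time:
--             if count!=0:
--                 cus.pop(0)
--                 count-=1
--             else:
--                 return "Impossible"
--         time+=1
--     return "Possible"
-- ===== SOURCE B (Python) =====
-- def solution(cus, M, K):
--     # Serve the customers one by one: the i-th customer is served at
--     # t = max(previous serve time + 1, arrival); the stock at that moment
--     # is the K * (t // M) breads baked so far minus the i already sold.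
--     t = -1
--     for i, a in enumerate(cus):
--         t = max(t + 1, a)
--         if K * (t // M) == i:
--             return "Impossible"
--     return "Possible"
-- ===== Notes on version B (the rewrite author's own statement) =====
-- stated objective: alternative
-- what changed: Replaces the minute-by-minute while loop with a single pass over the customers, computing each serve time t=max(prev_t+1,arrival) and the stock K*(t//M)-i in closed form; Pre_ restricts to a positive restock period M, the problem's natural domain, since for M=0 A raises ZeroDivisionError (except a degenerate corner) and for M<0 A's time%M==0 test accidentally restocks with period |M|.
-- outside the precondition, e.g. on solution([-1], 0, 1): A returns 'Impossible', B raises ZeroDivisionError; on solution([2, 2, 2], -2, 1): A returns 'Impossible', B returns 'Possible'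
import Mathlib
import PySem

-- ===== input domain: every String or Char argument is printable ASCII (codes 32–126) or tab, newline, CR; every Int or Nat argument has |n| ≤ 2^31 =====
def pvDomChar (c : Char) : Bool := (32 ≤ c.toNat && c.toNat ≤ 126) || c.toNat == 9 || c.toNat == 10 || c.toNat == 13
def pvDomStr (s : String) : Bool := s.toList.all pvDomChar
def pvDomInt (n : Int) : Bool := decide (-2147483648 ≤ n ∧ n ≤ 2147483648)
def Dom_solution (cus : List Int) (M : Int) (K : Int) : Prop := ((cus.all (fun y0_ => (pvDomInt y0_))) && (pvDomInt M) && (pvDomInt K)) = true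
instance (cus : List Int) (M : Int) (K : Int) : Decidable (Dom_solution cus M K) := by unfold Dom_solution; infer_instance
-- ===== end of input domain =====

-- B replaces A's minute-by-minute simulation by one pass over the customers with a
-- closed-form stock count (alternative algorithm). A pops served customers from its
-- argument; the equivalence proved here is about the return value only, B does not mutate.

-- ===== PORT A =====
-- A's while loop: state (cus, count, time); one call = one loop iteration
def solutionLoop (M K : Int) (cus : List Int) (count time : Int) : String :=
  match cus with
  | [] => "Possible"
  | a :: rest =>
    let count' := if time ≠ 0 ∧ PySem.Int.mod time M = 0 then count + K else count
    if a ≤ time then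
      if count' ≠ 0 then solutionLoop M K rest (count' - 1) (time + 1)
      else "Impossible"
    else solutionLoop M K (a :: rest) count' (time + 1)
termination_by (cus.length, ((cus.headD 0) - time).toNat)
decreasing_by
  · simp only [List.length_cons]; exact Prod.Lex.left _ _ (by omega)
  · refine Prod.Lex.right _ ?_
    simp only [List.headD_cons]
    omega

def solution (cus : List Int) (M : Int) (K : Int) : String :=
  solutionLoop M K cus 0 0

-- ===== PORT B =====
-- B's for loop over enumerate(cus): state (remaining customers, index i, last serve time t)
def solutionAltLoop (M K : Int) : List Int → Int → Int → String
  | [], _, _ => "Possible"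
  | a :: rest, i, t =>
    let t' := max (t + 1) a
    if K * PySem.Int.floordiv t' M = i then "Impossible"
    else solutionAltLoop M K rest (i + 1) t'

def solution_alt (cus : List Int) (M : Int) (K : Int) : String :=
  solutionAltLoop M K cus 0 (-1)

-- ===== PRECONDITION & SPEC =====
-- Pre_ restricts to a positive restock period M, the problem's natural domain: for
-- M = 0 A raises ZeroDivisionError except in a degenerate corner, and for M < 0
-- A's `time % M == 0` test accidentally restocks with period |M|, an artefact of
-- Python's modulus that B's closed form does not reproduce.
def Pre_solution (cus : List Int) (M : Int) (K : Int) : Prop := 1 ≤ M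
instance (cus : List Int) (M : Int) (K : Int) : Decidable (Pre_solution cus M K) := by
  unfold Pre_solution; infer_instance

def pvWitness_solution : List Int × Int × Int := ([0, 2, 5], 2, 1)

def Spec_solution (cus : List Int) (M : Int) (K : Int) (out : String) : Prop := out = solution_alt cus M K
instance (cus : List Int) (M : Int) (K : Int) (out : String) : Decidable (Spec_solution cus M K out) := by unfold Spec_solution; infer_instance

-- ===== CLAIM (what is proved, stated in full; the proofs are below) =====
def Claim_equal_solution : Prop := ∀ (cus : List Int) (M : Int) (K : Int), Dom_solution cus M K → Pre_solution cus M K → Spec_solution cus M K (solution cus M K)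

-- ===== LEMMAS AND PROOFS =====

-- ediv step: how ⌊u/m⌋ changes from u-1 to u, for a positive divisor
theorem pv_ediv_step (m u : Int) (hm : 0 < m) :
    u / m = (u - 1) / m + (if m ∣ u then 1 else 0) := by
  have h0 : u = m * (u / m) + u % m := (Int.ediv_add_emod u m).symm
  have hr0 : 0 ≤ u % m := Int.emod_nonneg u (by omega)
  have hrm : u % m < m := Int.emod_lt_of_pos u hm
  have hdvd : m ∣ u ↔ u % m = 0 := Int.dvd_iff_emod_eq_zero
  by_cases h : u % m = 0
  · rw [if_pos (hdvd.mpr h)]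
    have he : u - 1 = (m - 1) + (u / m - 1) * m := by nlinarith [h0]
    have hz : (m - 1) / m = 0 := Int.ediv_eq_zero_of_lt (by omega) (by omega)
    rw [he, Int.add_mul_ediv_right _ _ (by omega : m ≠ 0), hz]
    omega
  · rw [if_neg (fun hd => h (hdvd.1 hd))]
    have he : u - 1 = (u % m - 1) + (u / m) * m := by nlinarith [h0]
    have hz : (u % m - 1) / m = 0 := Int.ediv_eq_zero_of_lt (by omega) (by omega)
    rw [he, Int.add_mul_ediv_right _ _ (by omega : m ≠ 0), hz]
    omega

-- the replenishment step of A's loop in closed form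
theorem pv_count_step (M K t count served : Int) (hM : 0 < M) (ht : 1 ≤ t)
    (hc : count = K * ((t - 1) / M) - served) :
    (if t ≠ 0 ∧ PySem.Int.mod t M = 0 then count + K else count)
      = K * (t / M) - served := by
  have hmod : (PySem.Int.mod t M = 0) ↔ (M ∣ t) := PySem.Int.mod_eq_zero_iff_dvd t M
  rw [pv_ediv_step M t hM]
  by_cases hd : M ∣ t
  · rw [if_pos ⟨by omega, hmod.mpr hd⟩, if_pos hd]; rw [hc]; ring
  · rw [if_neg (fun h => hd (hmod.mp h.2)), if_neg hd]; rw [hc]; ring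

-- unfolding B's loop once: moving the previous serve time up to just below the
-- next arrival does not change B's result
theorem pv_altLoop_shift (M K a : Int) (rest : List Int) (served t : Int)
    (h : t + 1 ≤ a) :
    solutionAltLoop M K (a :: rest) served (t - 1) = solutionAltLoop M K (a :: rest) served t := by
  simp only [solutionAltLoop]
  have h1 : max (t - 1 + 1) a = a := by omega
  have h2 : max (t + 1) a = a := by omega
  rw [h1, h2]

-- main invariant: loop A at (cus, count, time = t) with t ≥ 1 and
-- count = K*⌊(t-1)/M⌋ - served equals loop B at (cus, served, t-1)
theorem pv_main (M K : Int) (hM : 0 < M) (cus : List Int) :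
    ∀ served t count, 1 ≤ t → count = K * ((t - 1) / M) - served →
      solutionLoop M K cus count t = solutionAltLoop M K cus served (t - 1) := by
  induction cus with
  | nil => intro served t count _ _; simp [solutionLoop, solutionAltLoop]
  | cons a rest ih =>
    intro served
    suffices h : ∀ n : Nat, ∀ t count, 1 ≤ t → n = (a - t).toNat →
        count = K * ((t - 1) / M) - served →
        solutionLoop M K (a :: rest) count t = solutionAltLoop M K (a :: rest) served (t - 1) by
      intro t count ht hc
      exact h (a - t).toNat t count ht rfl hc
    intro n
    induction n with
    | zero =>
      intro t count ht hn hc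
      have ha : a ≤ t := by omega
      rw [solutionLoop, solutionAltLoop]
      rw [pv_count_step M K t count served hM ht hc, if_pos ha]
      have hmax : max (t - 1 + 1) a = t := by omega
      rw [hmax, PySem.Int.floordiv_eq_ediv_of_pos hM]
      by_cases heq : K * (t / M) = served
      · rw [if_pos heq, if_neg (by omega)]
      · rw [if_neg heq, if_pos (by omega)]
        have := ih (served + 1) (t + 1) (K * (t / M) - served - 1)
          (by omega) (by rw [show t + 1 - 1 = t by ring]; ring)
        rw [this, show t + 1 - 1 = t by ring]
    | succ n ihn =>
      intro t count ht hn hc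
      have ha : t + 1 ≤ a := by omega
      rw [solutionLoop]
      rw [pv_count_step M K t count served hM ht hc, if_neg (by omega : ¬ a ≤ t)]
      rw [ihn (t + 1) (K * (t / M) - served) (by omega) (by omega)
          (by rw [show t + 1 - 1 = t by ring])]
      rw [show t + 1 - 1 = t by ring, pv_altLoop_shift M K a rest served t ha]

-- ===== VERDICT (by name: the statement is the Claim_ definition above) =====
theorem solution_spec : Claim_equal_solution := by
  intro cus M K _ hpre
  have hM : 0 < M := hpre
  unfold Spec_solution
  cases cus with
  | nil => simp [solution, solution_alt, solutionLoop, solutionAltLoop]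
  | cons a rest =>
    unfold solution solution_alt
    rw [solutionLoop]
    simp only [if_neg (by simp : ¬ ((0:Int) ≠ 0 ∧ PySem.Int.mod 0 M = 0))]
    by_cases ha : a ≤ (0 : Int)
    · rw [if_pos ha, if_neg (by omega)]
      rw [solutionAltLoop]
      have hmax : max ((-1:Int) + 1) a = 0 := by omega
      rw [hmax, PySem.Int.floordiv_eq_ediv_of_pos hM]
      rw [if_pos (by simp)]
    · rw [if_neg ha]
      have h1 := pv_main M K hM (a :: rest) 0 1 0 (by omega)
        (by simp)
      rw [show (0:Int) + 1 = 1 by ring, h1, show (1:Int) - 1 = 0 by ring,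
          ← pv_altLoop_shift M K a rest 0 0 (by omega), show (0:Int) - 1 = -1 by ring]
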